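-- pv_equiv track=rewrite | github.com/SP-FA/Integration-of-Radar-and-Vision-for-Water-Surface-Target-Tracking | tools/stupid_tools.py | map_label_to_color
-- ===== SOURCE A (Python) =====
-- def map_label_to_color(arr):
--     COLOR_NUMBER = 10
--     numDict = {}
--     cnt = 0
--     for i in range(len(arr)):
--         if arr[i] == -1:
--             continue
--         if arr[i] not in numDict:
--             numDict[arr[i]] = cnt
--             arr[i] = cnt
--             cnt = (cnt + 1) % COLOR_NUMBER
--         else:
--             arr[i] = numDict[arr[i]]
--     return arr
-- ===== SOURCE B (Python) =====
-- def map_label_to_color(arr):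
--     # Two-pass: build the label->color table first, then apply it. Same in-place mutation as A.
--     mapping = {}
--     for x in arr:
--         if x != -1 and x not in mapping:
--             mapping[x] = len(mapping) % 10
--     for i, x in enumerate(arr):
--         if x != -1:
--             arr[i] = mapping[x]
--     return arr
-- ===== Notes on version B (the rewrite author's own statement) =====
-- stated objective: simpler
-- what changed: Replaces the single loop that interleaves table-building, counter arithmetic and writing with two plain passes: first build the label->color table (color = table size mod 10), then map every non -1 entry through the finished table.
import Mathlib
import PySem

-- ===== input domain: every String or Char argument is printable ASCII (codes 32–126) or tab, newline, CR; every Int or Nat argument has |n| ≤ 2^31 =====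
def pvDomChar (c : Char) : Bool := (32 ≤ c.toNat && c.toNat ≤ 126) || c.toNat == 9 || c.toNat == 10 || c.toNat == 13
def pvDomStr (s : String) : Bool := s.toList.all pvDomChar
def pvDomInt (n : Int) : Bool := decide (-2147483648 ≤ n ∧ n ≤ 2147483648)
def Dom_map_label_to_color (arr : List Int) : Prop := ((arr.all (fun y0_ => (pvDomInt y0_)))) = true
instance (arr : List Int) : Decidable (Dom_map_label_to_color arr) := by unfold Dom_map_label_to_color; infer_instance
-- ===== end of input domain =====

-- B replaces A's single loop (interleaving dict-building, counter arithmetic and writing) by two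
-- plain passes: build the label->color table (color = table size mod 10), then map through it.
-- Both Pythons mutate arr in place identically; the equivalence proved is about the return value.


-- ===== PORT A =====
-- A's loop over i in range(len(arr)), mutating arr[i]; state = (numDict, cnt), output built in order.
def mlcLoopA (d : PySem.Dict Int Int) (cnt : Int) : List Int → List Int
  | [] => []
  | x :: xs =>
    if x = -1 then x :: mlcLoopA d cnt xs
    else
      match d.get? x with
      | none   => cnt :: mlcLoopA (d.insert x cnt) (PySem.Int.mod (cnt + 1) 10) xs
      | some v => v :: mlcLoopA d cnt xs

def map_label_to_color (arr : List Int) : List Int :=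
  mlcLoopA PySem.Dict.empty 0 arr

-- ===== PORT B =====
-- first pass: build the table (color = current table size mod 10)
def mlcBuild (m : PySem.Dict Int Int) : List Int → PySem.Dict Int Int
  | [] => m
  | x :: xs =>
    if x ≠ -1 ∧ ¬ m.contains x then
      mlcBuild (m.insert x (PySem.Int.mod (PySem.Dict.size m) 10)) xs
    else mlcBuild m xs

-- second pass: apply the finished table
def map_label_to_color_alt (arr : List Int) : List Int :=
  let m := mlcBuild PySem.Dict.empty arr
  arr.map (fun x => if x = -1 then x else m.getD x 0)

-- ===== PRECONDITION & SPEC =====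
def Spec_map_label_to_color (arr : List Int) (out : List Int) : Prop := out = map_label_to_color_alt arr
instance (arr : List Int) (out : List Int) : Decidable (Spec_map_label_to_color arr out) := by unfold Spec_map_label_to_color; infer_instance

-- ===== CLAIM (what is proved, stated in full; the proofs are below) =====
def Claim_equal_map_label_to_color : Prop := ∀ (arr : List Int), Dom_map_label_to_color arr → Spec_map_label_to_color arr (map_label_to_color arr)

-- ===== LEMMAS AND PROOFS =====

-- mlcBuild never overwrites: an existing binding survives the whole build
theorem mlcBuild_mono (xs : List Int) (m : PySem.Dict Int Int) (k v : Int)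
    (h : m.get? k = some v) : (mlcBuild m xs).get? k = some v := by
  induction xs generalizing m with
  | nil => simpa [mlcBuild] using h
  | cons x xs ih =>
    by_cases hx : x ≠ -1 ∧ ¬ m.contains x
    · have hne : k ≠ x := by
        rintro rfl
        exact hx.2 (by simp [PySem.Dict.contains_eq_isSome_get?, h])
      simp only [mlcBuild, if_pos hx]
      exact ih _ (by rw [PySem.Dict.get?_insert_of_ne _ _ hne]; exact h)
    · simp only [mlcBuild, if_neg hx]
      exact ih _ h

-- main invariant: A's loop, with its counter equal to (size of the table so far) mod 10,
-- equals mapping the rest of the list through the finished table.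
theorem mlcLoopA_eq_map (xs : List Int) (m : PySem.Dict Int Int) :
    mlcLoopA m (PySem.Int.mod (PySem.Dict.size m) 10) xs =
      xs.map (fun x => if x = -1 then x else (mlcBuild m xs).getD x 0) := by
  induction xs generalizing m with
  | nil => simp [mlcLoopA, mlcBuild]
  | cons x xs ih =>
    by_cases hx : x = -1
    · subst hx
      have hcond : ¬ ((-1 : Int) ≠ -1 ∧ ¬ m.contains (-1)) := by simp
      simp only [mlcLoopA, mlcBuild, if_neg hcond, List.map_cons]
      exact congrArg _ (ih m)
    · cases hg : m.get? x with
      | none =>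
        have hc : ¬ m.contains x := by simp [PySem.Dict.contains_eq_isSome_get?, hg]
        have hcond : x ≠ -1 ∧ ¬ m.contains x := ⟨hx, hc⟩
        simp only [mlcLoopA, if_neg hx, hg, mlcBuild, if_pos hcond, List.map_cons]
        set m' := m.insert x (PySem.Int.mod (PySem.Dict.size m) 10) with hm'
        have hhead : (mlcBuild m' xs).getD x 0 = PySem.Int.mod (PySem.Dict.size m) 10 := by
          have : (mlcBuild m' xs).get? x = some (PySem.Int.mod (PySem.Dict.size m) 10) :=
            mlcBuild_mono xs m' x _ (by rw [hm']; exact PySem.Dict.get?_insert_self m x _)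
          simp [PySem.Dict.getD_eq_get?_getD, this]
        have hsize : PySem.Dict.size m' = PySem.Dict.size m + 1 := by
          rw [hm', PySem.Dict.size_insert, if_neg (by simpa using hc)]
        have hcnt' : PySem.Int.mod (PySem.Int.mod (PySem.Dict.size m) 10 + 1) 10
            = PySem.Int.mod (PySem.Dict.size m') 10 := by
          have h10 : (0:Int) < 10 := by norm_num
          rw [hsize]
          rw [PySem.Int.mod_eq_emod_of_pos h10, PySem.Int.mod_eq_emod_of_pos h10,
              PySem.Int.mod_eq_emod_of_pos h10]
          push_cast
          omega
        rw [hhead, hcnt']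
        exact congrArg _ (ih m')
      | some v =>
        have hc : m.contains x := by simp [PySem.Dict.contains_eq_isSome_get?, hg]
        have hcond : ¬ (x ≠ -1 ∧ ¬ m.contains x) := by simp [hc]
        simp only [mlcLoopA, if_neg hx, hg, mlcBuild, if_neg hcond, List.map_cons]
        have hhead : (mlcBuild m xs).getD x 0 = v := by
          have := mlcBuild_mono xs m x v hg
          simp [PySem.Dict.getD_eq_get?_getD, this]
        rw [hhead]
        exact congrArg _ (ih m)

-- ===== VERDICT (by name: the statement is the Claim_ definition above) =====
theorem map_label_to_color_spec : Claim_equal_map_label_to_color := by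
  intro arr _
  show map_label_to_color arr = map_label_to_color_alt arr
  unfold map_label_to_color map_label_to_color_alt
  have h0 : (0:Int) = PySem.Int.mod (PySem.Dict.size (PySem.Dict.empty : PySem.Dict Int Int)) 10 := by decide
  rw [h0]
  exact mlcLoopA_eq_map arr PySem.Dict.empty
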